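-- pv_equiv track=rewrite | github.com/CodingTestStudy2/Daily_Morning_Coding_Test | 프로그래머스/lv3/최원준/표현 가능한 이진트리2.py | solution
-- ===== SOURCE A (Python) =====
-- def solution(numbers):
--     def fullbinary(number):
--         binary = bin(number)[2:]
--         length = len(binary)
--         totallength = 1
--         while totallength < length:
--             totallength = totallength * 2 + 1
--
--         ans = ""
--         for i in range(totallength - length):
--             ans += "0"
--         return ans + binary
--
--     def is_possible(bin):
--         n = len(bin)
--         stack = []
--         stack.append([0, n - 1])
--
--         while stack:
--             left, right = stack.pop()
--             mid = (left + right) // 2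
--
--             parent = bin[mid] == '1'
--
--             if left != mid:
--                 stack.append([left, mid - 1])
--             if mid != right:
--                 stack.append([mid + 1, right])
--
--             if not parent:
--                 if (mid != left and bin[(left + mid - 1) // 2] == '1') or (mid != right and bin[(mid + 1 + right) // 2] == '1'):
--                     return False
--         return True
--
--     n = len(numbers)
--     ans = []
--     for i in range(n):
--         if is_possible(fullbinary(numbers[i])):
--             ans.append(1)
--         else:
--             ans.append(0)
--     return ans
-- ===== SOURCE B (Python) =====
-- def solution(numbers):
--     def fullbinary(number):
--         binary = bin(number)[2:]
--         length = len(binary)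
--         totallength = 1
--         while totallength < length:
--             totallength = totallength * 2 + 1
--         return "0" * (totallength - length) + binary
--
--     def is_possible(b):
--         def check(left, right):
--             mid = (left + right) // 2
--             parent = b[mid] == '1'
--             if left != mid:
--                 if not parent and b[(left + mid - 1) // 2] == '1':
--                     return False
--                 if not check(left, mid - 1):
--                     return False
--             if mid != right:
--                 if not parent and b[(mid + 1 + right) // 2] == '1':
--                     return False
--                 if not check(mid + 1, right):
--                     return False
--             return True
--         return check(0, len(b) - 1)
--
--     return [1 if is_possible(fullbinary(x)) else 0 for x in numbers]
-- ===== Notes on version B (the rewrite author's own statement) =====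
-- stated objective: alternative
-- what changed: is_possible is rewritten as a recursive DFS helper check(left,right) over the implicit complete binary tree (with string-replication padding in fullbinary and a list comprehension for the answer) instead of A's explicit worklist stack loop.
import Mathlib
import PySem

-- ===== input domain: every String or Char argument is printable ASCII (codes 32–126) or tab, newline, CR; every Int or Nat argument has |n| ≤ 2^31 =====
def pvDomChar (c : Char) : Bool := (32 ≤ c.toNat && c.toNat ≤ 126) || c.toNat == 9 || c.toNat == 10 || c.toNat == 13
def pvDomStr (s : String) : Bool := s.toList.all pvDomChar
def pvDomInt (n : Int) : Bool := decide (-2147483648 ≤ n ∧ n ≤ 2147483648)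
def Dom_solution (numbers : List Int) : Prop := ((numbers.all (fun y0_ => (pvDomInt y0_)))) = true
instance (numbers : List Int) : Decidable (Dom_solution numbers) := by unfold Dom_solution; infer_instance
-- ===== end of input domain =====

-- B rewrites the stack-driven `is_possible` as a recursive DFS helper `check(left, right)`
-- (same return value, same cost; objective: alternative decomposition).

-- ===== PORT A =====

-- bin(number)[2:]  (both Pythons call the builtin `bin` identically)
def binChars (x : Int) : List Char :=
  PySem.List.slice (PySem.Int.toBinChars0b x) (some 2) none

-- the `while totallength < length: totallength = totallength * 2 + 1` loop (identical in both Pythons)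
def growTotal (total length : Nat) : Nat :=
  if total < length then growTotal (total * 2 + 1) length else total
termination_by length - total

-- `bin[i] == '1'` (the index is always in range whenever this is evaluated)
def one1 (b : List Char) (i : Int) : Bool := PySem.List.pyGet? b i == some '1'

def fullbinaryA (x : Int) : List Char :=
  let binary := binChars x
  let length := binary.length
  let totallength := growTotal 1 length
  ((List.range (totallength - length)).foldl (fun ans _ => ans ++ ['0']) []) ++ binary

-- A's while-stack loop; the fuel only makes the recursion total (b.length always suffices, proved below)
def loopA (b : List Char) : Nat → List (Int × Int) → Option Bool
  | _, [] => some true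
  | 0, _ :: _ => none
  | fuel + 1, (l, r) :: rest =>
    let mid := PySem.Int.floordiv (l + r) 2
    let parent := one1 b mid
    let s1 := if l ≠ mid then (l, mid - 1) :: rest else rest
    let s2 := if mid ≠ r then (mid + 1, r) :: s1 else s1
    if !parent && ((decide (mid ≠ l) && one1 b (PySem.Int.floordiv (l + mid - 1) 2)) ||
                   (decide (mid ≠ r) && one1 b (PySem.Int.floordiv (mid + 1 + r) 2)))
    then some false
    else loopA b fuel s2

def isPossibleA (b : List Char) : Bool :=
  (loopA b b.length [(0, (b.length : Int) - 1)]).getD false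

def solution (numbers : List Int) : List Int :=
  (PySem.List.pyRange 0 (numbers.length : Int) 1).foldl
    (fun ans i =>
      if isPossibleA (fullbinaryA (PySem.List.pyGetD numbers i 0)) then ans ++ [(1 : Int)]
      else ans ++ [(0 : Int)]) []

-- ===== PORT B =====

def fullbinaryB (x : Int) : List Char :=
  let binary := binChars x
  let length := binary.length
  let totallength := growTotal 1 length
  List.replicate (totallength - length) '0' ++ binary

-- B's recursive DFS `check(left, right)`; the fuel only makes the recursion total
def checkB (b : List Char) : Nat → Int → Int → Option Bool
  | 0, _, _ => none
  | fuel + 1, l, r =>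
    let mid := PySem.Int.floordiv (l + r) 2
    let parent := one1 b mid
    match (if l ≠ mid then
             if !parent && one1 b (PySem.Int.floordiv (l + mid - 1) 2) then some false
             else checkB b fuel l (mid - 1)
           else some true) with
    | none => none
    | some false => some false
    | some true =>
      if mid ≠ r then
        if !parent && one1 b (PySem.Int.floordiv (mid + 1 + r) 2) then some false
        else checkB b fuel (mid + 1) r
      else some true

def isPossibleB (b : List Char) : Bool :=
  (checkB b b.length 0 ((b.length : Int) - 1)).getD false

def solution_alt (numbers : List Int) : List Int :=
  numbers.map (fun x => if isPossibleB (fullbinaryB x) then (1 : Int) else 0)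

-- ===== PRECONDITION & SPEC =====
def Spec_solution (numbers : List Int) (out : List Int) : Prop := out = solution_alt numbers
instance (numbers : List Int) (out : List Int) : Decidable (Spec_solution numbers out) := by unfold Spec_solution; infer_instance

-- ===== CLAIM (what is proved, stated in full; the proofs are below) =====
def Claim_equal_solution : Prop := ∀ (numbers : List Int), Dom_solution numbers → Spec_solution numbers (solution numbers)

-- ===== LEMMAS AND PROOFS =====

-- pure characterisation of the tree check, by well-founded recursion on the interval size
def chk (b : List Char) (l r : Int) : Bool :=
  if h : l < r then
    let mid := PySem.Int.floordiv (l + r) 2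
    let parent := one1 b mid
    (if l ≠ mid then !(!parent && one1 b (PySem.Int.floordiv (l + mid - 1) 2)) && chk b l (mid - 1) else true) &&
    (if mid ≠ r then !(!parent && one1 b (PySem.Int.floordiv (mid + 1 + r) 2)) && chk b (mid + 1) r else true)
  else true
termination_by (r - l).toNat
decreasing_by
  · have := PySem.Int.floordiv_two_mid_bounds (lo := l) (hi := r) (le_of_lt h)
    omega
  · have := PySem.Int.floordiv_two_mid_bounds (lo := l) (hi := r) (le_of_lt h)
    omega

lemma chk_of_eq (b : List Char) (l r : Int) (h : l = r) : chk b l r = true := by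
  rw [chk]; simp [h]

lemma chk_lt (b : List Char) (l r : Int) (h : l < r) :
    chk b l r =
      ((if l ≠ PySem.Int.floordiv (l + r) 2 then
          !(!one1 b (PySem.Int.floordiv (l + r) 2) && one1 b (PySem.Int.floordiv (l + PySem.Int.floordiv (l + r) 2 - 1) 2)) &&
            chk b l (PySem.Int.floordiv (l + r) 2 - 1)
        else true) &&
       (if PySem.Int.floordiv (l + r) 2 ≠ r then
          !(!one1 b (PySem.Int.floordiv (l + r) 2) && one1 b (PySem.Int.floordiv (PySem.Int.floordiv (l + r) 2 + 1 + r) 2)) &&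
            chk b (PySem.Int.floordiv (l + r) 2 + 1) r
        else true)) := by
  rw [chk]; simp [h]

set_option maxRecDepth 4096 in
lemma checkB_eq_chk (b : List Char) :
    ∀ fuel (l r : Int), l ≤ r → (r - l).toNat < fuel → checkB b fuel l r = some (chk b l r) := by
  intro fuel
  induction fuel with
  | zero => intro l r _ h; omega
  | succ f ih =>
    intro l r hlr hfu
    have hfd : ∀ a : Int, PySem.Int.floordiv a 2 = a / 2 :=
      fun a => PySem.Int.floordiv_eq_ediv_of_pos (by norm_num)
    rcases eq_or_lt_of_le hlr with heq | hlt
    · subst heq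
      simp only [checkB, hfd]
      have hm : (l + l) / 2 = l := by omega
      simp [hm, chk_of_eq b l l rfl]
    · rw [chk_lt b l r hlt]
      simp only [checkB, hfd]
      have hm : l ≤ (l + r) / 2 ∧ (l + r) / 2 ≤ r := by omega
      have hne : ¬(l = r) := by omega
      by_cases h1 : l = (l + r) / 2
      · have h2 : ¬((l + r) / 2 = r) := by omega
        rw [ih ((l + r) / 2 + 1) r (by omega) (by omega)]
        by_cases hp : one1 b ((l + r) / 2) = true <;>
          by_cases hgr : one1 b (((l + r) / 2 + 1 + r) / 2) = true <;>
            simp [eq_true h1, h2, hp, hgr]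
      · rw [ih l ((l + r) / 2 - 1) (by omega) (by omega)]
        by_cases h2 : (l + r) / 2 = r
        · by_cases hp : one1 b ((l + r) / 2) = true <;>
            by_cases hgl : one1 b ((l + (l + r) / 2 - 1) / 2) = true <;>
              (try cases hc : chk b l ((l + r) / 2 - 1)) <;>
                simp [hp, hgl, h1, eq_true h2, hne, hc]
        · rw [ih ((l + r) / 2 + 1) r (by omega) (by omega)]
          by_cases hp : one1 b ((l + r) / 2) = true <;>
            by_cases hgl : one1 b ((l + (l + r) / 2 - 1) / 2) = true <;>
              by_cases hgr : one1 b (((l + r) / 2 + 1 + r) / 2) = true <;>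
                (try cases hc : chk b l ((l + r) / 2 - 1)) <;>
                  simp [hp, hgl, hgr, h1, h2, hc]

def sumSizes (s : List (Int × Int)) : Nat := (s.map (fun p => (p.2 - p.1 + 1).toNat)).sum

lemma sumSizes_cons (l r : Int) (s : List (Int × Int)) :
    sumSizes ((l, r) :: s) = (r - l + 1).toNat + sumSizes s := by simp [sumSizes]

set_option maxRecDepth 4096 in
lemma chk_step (b : List Char) (l r : Int) (hlr : l ≤ r) :
    chk b l r =
      (!(!one1 b (PySem.Int.floordiv (l + r) 2) &&
         (decide (PySem.Int.floordiv (l + r) 2 ≠ l) && one1 b (PySem.Int.floordiv (l + PySem.Int.floordiv (l + r) 2 - 1) 2) ||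
          decide (PySem.Int.floordiv (l + r) 2 ≠ r) && one1 b (PySem.Int.floordiv (PySem.Int.floordiv (l + r) 2 + 1 + r) 2))) &&
       ((if PySem.Int.floordiv (l + r) 2 ≠ r then chk b (PySem.Int.floordiv (l + r) 2 + 1) r else true) &&
        (if l ≠ PySem.Int.floordiv (l + r) 2 then chk b l (PySem.Int.floordiv (l + r) 2 - 1) else true))) := by
  have hfd : ∀ a : Int, PySem.Int.floordiv a 2 = a / 2 :=
    fun a => PySem.Int.floordiv_eq_ediv_of_pos (by norm_num)
  rcases eq_or_lt_of_le hlr with heq | hlt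
  · subst heq
    have hm : (l + l) / 2 = l := by omega
    simp [hfd, hm, chk_of_eq b l l rfl]
  · rw [chk_lt b l r hlt]
    simp only [hfd]
    have hm : l ≤ (l + r) / 2 ∧ (l + r) / 2 ≤ r := by omega
    by_cases h1 : l = (l + r) / 2
    · have h2 : ¬((l + r) / 2 = r) := by omega
      by_cases hp : one1 b ((l + r) / 2) = true <;>
        by_cases hgr : one1 b (((l + r) / 2 + 1 + r) / 2) = true <;>
          simp [eq_true h1, eq_true h1.symm, h2, hp, hgr]
    · have h1s : ¬((l + r) / 2 = l) := fun h => h1 h.symm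
      by_cases h2 : (l + r) / 2 = r
      · by_cases hp : one1 b ((l + r) / 2) = true <;>
          by_cases hgl : one1 b ((l + (l + r) / 2 - 1) / 2) = true <;>
            simp [hp, hgl, h1, h1s, eq_true h2, eq_true h2.symm]
      · by_cases hp : one1 b ((l + r) / 2) = true <;>
          by_cases hgl : one1 b ((l + (l + r) / 2 - 1) / 2) = true <;>
            by_cases hgr : one1 b (((l + r) / 2 + 1 + r) / 2) = true <;>
              simp [hp, hgl, hgr, h1, h1s, h2, Bool.and_comm]

set_option maxRecDepth 4096 in
lemma loopA_eq_chk (b : List Char) :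
    ∀ fuel (s : List (Int × Int)), (∀ p ∈ s, p.1 ≤ p.2) → sumSizes s ≤ fuel →
      loopA b fuel s = some (s.all (fun p => chk b p.1 p.2)) := by
  intro fuel
  induction fuel with
  | zero =>
    intro s hv hs
    cases s with
    | nil => simp [loopA]
    | cons p rest =>
      obtain ⟨l, r⟩ := p
      have := hv (l, r) (List.mem_cons_self ..)
      rw [sumSizes_cons] at hs
      omega
  | succ f ih =>
    intro s hv hs
    cases s with
    | nil => simp [loopA]
    | cons p rest =>
      obtain ⟨l, r⟩ := p
      have hlr : l ≤ r := hv (l, r) (List.mem_cons_self ..)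
      have hvr : ∀ p ∈ rest, p.1 ≤ p.2 := fun p hp => hv p (List.mem_cons_of_mem _ hp)
      rw [sumSizes_cons] at hs
      have hfd : ∀ a : Int, PySem.Int.floordiv a 2 = a / 2 :=
        fun a => PySem.Int.floordiv_eq_ediv_of_pos (by norm_num)
      simp only [loopA, List.all_cons]
      rw [chk_step b l r hlr]
      simp only [hfd]
      have hm : l ≤ (l + r) / 2 ∧ (l + r) / 2 ≤ r := by omega
      by_cases hg : (!one1 b ((l + r) / 2) &&
          (decide ((l + r) / 2 ≠ l) && one1 b ((l + (l + r) / 2 - 1) / 2) ||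
           decide ((l + r) / 2 ≠ r) && one1 b (((l + r) / 2 + 1 + r) / 2))) = true
      · rw [if_pos hg, hg]
        simp
      · have hg' : (!one1 b ((l + r) / 2) &&
            (decide ((l + r) / 2 ≠ l) && one1 b ((l + (l + r) / 2 - 1) / 2) ||
             decide ((l + r) / 2 ≠ r) && one1 b (((l + r) / 2 + 1 + r) / 2))) = false := by
          revert hg
          cases (!one1 b ((l + r) / 2) &&
            (decide ((l + r) / 2 ≠ l) && one1 b ((l + (l + r) / 2 - 1) / 2) ||
             decide ((l + r) / 2 ≠ r) && one1 b (((l + r) / 2 + 1 + r) / 2))) <;> simp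
        rw [if_neg hg, hg']
        by_cases h1 : l = (l + r) / 2
        · by_cases h2 : (l + r) / 2 = r
          · rw [if_neg (not_not_intro h2), if_neg (not_not_intro h1)]
            rw [ih rest hvr (by omega)]
            simp [eq_true h1, eq_true h1.symm, eq_true h2, eq_true h2.symm]
          · rw [if_pos h2, if_neg (not_not_intro h1)]
            rw [ih (((l + r) / 2 + 1, r) :: rest)
                (by intro p hp
                    rcases List.mem_cons.1 hp with h | h
                    · subst h; simp; omega
                    · exact hvr p h)
                (by rw [sumSizes_cons]; omega)]
            simp [eq_true h1, eq_true h1.symm, h2, Bool.and_assoc]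
        · have h1s : ¬((l + r) / 2 = l) := fun h => h1 h.symm
          by_cases h2 : (l + r) / 2 = r
          · rw [if_neg (not_not_intro h2), if_pos h1]
            rw [ih ((l, (l + r) / 2 - 1) :: rest)
                (by intro p hp
                    rcases List.mem_cons.1 hp with h | h
                    · subst h; simp; omega
                    · exact hvr p h)
                (by rw [sumSizes_cons]; omega)]
            simp [h1, h1s, eq_true h2, eq_true h2.symm, Bool.and_assoc]
          · rw [if_pos h2, if_pos h1]
            rw [ih (((l + r) / 2 + 1, r) :: (l, (l + r) / 2 - 1) :: rest)
                (by intro p hp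
                    rcases List.mem_cons.1 hp with h | h
                    · subst h; simp; omega
                    · rcases List.mem_cons.1 h with h' | h'
                      · subst h'; simp; omega
                      · exact hvr p h')
                (by rw [sumSizes_cons, sumSizes_cons]; omega)]
            simp [h1, h1s, h2, Bool.and_assoc]
lemma binChars_ne_nil (x : Int) : binChars x ≠ [] := by
  apply List.ne_nil_of_length_pos
  unfold binChars PySem.Int.toBinChars0b
  rw [PySem.List.slice_from _ (by norm_num : (0:Int) ≤ 2)]
  have h2 := (Nat.length_toDigits_pos (b := 2) (n := Int.natAbs x))
  have h3 := (Nat.length_toDigits_pos (b := 2) (n := Int.toNat x))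
  split <;> (simp; try omega)

lemma fullbinaryA_eq (x : Int) : fullbinaryA x = fullbinaryB x := by
  simp only [fullbinaryA, fullbinaryB]
  rw [PySem.List.foldl_append_singleton_eq_map (f := fun _ => '0')]
  simp [List.map_const']

lemma fullbinaryB_ne_nil (x : Int) : fullbinaryB x ≠ [] := by
  unfold fullbinaryB
  simp [binChars_ne_nil x]

lemma isPossibleA_eq (b : List Char) (hb : b ≠ []) : isPossibleA b = isPossibleB b := by
  have hn : 0 < b.length := List.length_pos_of_ne_nil hb
  unfold isPossibleA isPossibleB
  rw [checkB_eq_chk b b.length 0 ((b.length : Int) - 1) (by omega) (by omega)]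
  rw [loopA_eq_chk b b.length [(0, (b.length : Int) - 1)]
      (by intro p hp
          rw [List.mem_singleton] at hp
          subst hp
          simp
          omega)
      (by rw [sumSizes_cons]; simp [sumSizes]; try omega)]
  simp

-- ===== VERDICT (by name: the statement is the Claim_ definition above) =====
theorem solution_spec : Claim_equal_solution := by
  intro numbers _
  unfold Spec_solution solution solution_alt
  rw [PySem.List.foldl_pyRange_zero_pyGetD' numbers 0
      (fun ans x => if isPossibleA (fullbinaryA x) then ans ++ [(1 : Int)] else ans ++ [(0 : Int)]) []]
  rw [PySem.List.foldl_congr_mem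
      (l := numbers) (init := ([] : List Int))
      (f := fun ans x => if isPossibleA (fullbinaryA x) then ans ++ [(1 : Int)] else ans ++ [(0 : Int)])
      (g := fun acc x => acc ++ [if isPossibleB (fullbinaryB x) then (1 : Int) else 0])
      (by intro acc x _
          show (if isPossibleA (fullbinaryA x) then acc ++ [(1 : Int)] else acc ++ [(0 : Int)])
              = acc ++ [if isPossibleB (fullbinaryB x) then (1 : Int) else 0]
          rw [fullbinaryA_eq, isPossibleA_eq _ (fullbinaryB_ne_nil x)]
          split <;> rfl)]
  rw [PySem.List.foldl_append_singleton_eq_map]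
  simp
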